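-- pv_equiv track=rewrite | github.com/francescopioscognamiglio/pythonExercises | exercises/getChildrenKeysOfSearchBinaryTreeImplementedViaPointersAndArray.py | getChildrenKeysViaArray
-- ===== SOURCE A (Python) =====
-- def getChildrenKeysViaArray(A, key, i = 0):
--     if i >= len(A): return None, None
--     if A[i] == key:
--         if 2*i+1 < len(A) and 2*i+2 < len(A): return A[2*i+1], A[2*i+2]
--         elif 2*i+1 < len(A): return A[2*i+1], None
--         elif 2*i+2 < len(A): return None, A[2*i+2]
--         else: return None, None
--     if key > A[i]: return getChildrenKeysViaArray(A, key, 2*i+2)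
--     return getChildrenKeysViaArray(A, key, 2*i+1)
-- ===== SOURCE B (Python) =====
-- def getChildrenKeysViaArray(A, key, i = 0):
--     # iterative descent to locate the key's index, then fetch both children
--     # with one uniform bounds-checked helper
--     while i < len(A) and A[i] != key:
--         i = 2*i+2 if key > A[i] else 2*i+1
--     if i >= len(A):
--         return None, None
--     def child(j):
--         return A[j] if j < len(A) else None
--     return child(2*i+1), child(2*i+2)
-- ===== Notes on version B (the rewrite author's own statement) =====
-- stated objective: simpler
-- what changed: Replaces the recursive descent and the four-way bounds-checked return with an iterative while-loop that first finds the key's index and a single bounds-checked child helper applied to both children.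
-- outside the precondition, e.g. on getChildrenKeysViaArray([5], 5, -1): A returns (5, 5), B returns (5, 5)
import Mathlib
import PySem

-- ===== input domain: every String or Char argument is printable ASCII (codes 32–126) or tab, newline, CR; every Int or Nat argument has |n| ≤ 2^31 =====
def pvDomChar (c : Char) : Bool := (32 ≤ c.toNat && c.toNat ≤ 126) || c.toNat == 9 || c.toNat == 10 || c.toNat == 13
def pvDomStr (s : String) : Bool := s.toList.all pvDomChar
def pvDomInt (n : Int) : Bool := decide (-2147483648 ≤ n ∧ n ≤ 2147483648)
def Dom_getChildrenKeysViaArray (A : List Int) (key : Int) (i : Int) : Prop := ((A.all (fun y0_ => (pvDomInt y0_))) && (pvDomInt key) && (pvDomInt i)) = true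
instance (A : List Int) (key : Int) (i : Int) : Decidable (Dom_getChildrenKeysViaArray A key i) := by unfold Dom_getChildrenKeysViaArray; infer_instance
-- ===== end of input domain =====

-- B: iterative descent split into "find the key's index" + one bounds-checked child helper,
-- instead of A's recursion with a four-way bounds-checked return (objective: simpler).
-- Pre_ excludes i < 0: there Python's negative-index wraparound makes both programs
-- descend on negative indices and diverge (RecursionError / infinite loop) on some inputs.


-- ===== PORT A =====
-- recursive descent, transliterated; Nat index (Pre_ guarantees 0 ≤ i)
def goA (A : List Int) (key : Int) (i : Nat) : Option Int × Option Int :=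
  if _h : i ≥ A.length then (none, none)
  else if A.getD i 0 = key then
    if 2*i+1 < A.length ∧ 2*i+2 < A.length then (some (A.getD (2*i+1) 0), some (A.getD (2*i+2) 0))
    else if 2*i+1 < A.length then (some (A.getD (2*i+1) 0), none)
    else if 2*i+2 < A.length then (none, some (A.getD (2*i+2) 0))
    else (none, none)
  else if key > A.getD i 0 then goA A key (2*i+2)
  else goA A key (2*i+1)
termination_by A.length - i
decreasing_by all_goals omega

def getChildrenKeysViaArray (A : List Int) (key : Int) (i : Int) : Option Int × Option Int :=
  if i < 0 then (none, none)   -- totality guard; Pre_ excludes i < 0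
  else goA A key i.toNat

-- ===== PORT B =====
-- while-loop locating the key's index (none = fell off the array)
def findB (A : List Int) (key : Int) (i : Nat) : Option Nat :=
  if _h : i < A.length then
    if A.getD i 0 = key then some i
    else findB A key (if key > A.getD i 0 then 2*i+2 else 2*i+1)
  else none
termination_by A.length - i
decreasing_by split <;> omega

-- bounds-checked child fetch
def childB (A : List Int) (j : Nat) : Option Int :=
  if j < A.length then some (A.getD j 0) else none

def getChildrenKeysViaArray_alt (A : List Int) (key : Int) (i : Int) : Option Int × Option Int :=
  if i < 0 then (none, none)   -- totality guard; Pre_ excludes i < 0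
  else
    match findB A key i.toNat with
    | none => (none, none)
    | some j => (childB A (2*j+1), childB A (2*j+2))

-- ===== PRECONDITION & SPEC =====
-- Pre_ excludes negative i: there Python wraps indices and both programs can diverge.
def Pre_getChildrenKeysViaArray (_A : List Int) (_key : Int) (i : Int) : Prop := 0 ≤ i
instance (A : List Int) (key : Int) (i : Int) : Decidable (Pre_getChildrenKeysViaArray A key i) := by unfold Pre_getChildrenKeysViaArray; infer_instance
def pvWitness_getChildrenKeysViaArray : List Int × Int × Int := ([5, 3, 8], 3, 0)

def Spec_getChildrenKeysViaArray (A : List Int) (key : Int) (i : Int) (out : Option Int × Option Int) : Prop := out = getChildrenKeysViaArray_alt A key i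
instance (A : List Int) (key : Int) (i : Int) (out : Option Int × Option Int) : Decidable (Spec_getChildrenKeysViaArray A key i out) := by unfold Spec_getChildrenKeysViaArray; infer_instance

-- ===== CLAIM (what is proved, stated in full; the proofs are below) =====
def Claim_equal_getChildrenKeysViaArray : Prop := ∀ (A : List Int) (key : Int) (i : Int), Dom_getChildrenKeysViaArray A key i → Pre_getChildrenKeysViaArray A key i → Spec_getChildrenKeysViaArray A key i (getChildrenKeysViaArray A key i)

-- ===== LEMMAS AND PROOFS =====
def altOf (A : List Int) (key : Int) (i : Nat) : Option Int × Option Int :=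
  match findB A key i with
  | none => (none, none)
  | some j => (childB A (2*j+1), childB A (2*j+2))

theorem goA_eq_aux (A : List Int) (key : Int) :
    ∀ (n i : Nat), A.length - i ≤ n → goA A key i = altOf A key i := by
  intro n
  induction n with
  | zero =>
      intro i h
      have hge : i ≥ A.length := by omega
      have hnl : ¬ i < A.length := by omega
      rw [goA, altOf, findB]
      simp [hge, hnl]
  | succ n ih =>
      intro i h
      rw [goA, altOf, findB]
      by_cases hge : i ≥ A.length
      · have hnl : ¬ i < A.length := by omega
        simp [hge, hnl]
      · have hlt : i < A.length := by omega
        have hd : A.getD i 0 = A[i] := List.getD_eq_getElem A 0 hlt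
        by_cases hk : A[i] = key
        · simp [hge, hlt, hk, childB]
          split_ifs <;> simp_all
        · by_cases hgt : A[i] < key
          · have h2 := ih (2*i+2) (by omega)
            rw [altOf] at h2
            simp [hge, hlt, hk, hgt, h2]
          · have h2 := ih (2*i+1) (by omega)
            rw [altOf] at h2
            simp [hge, hlt, hk, hgt, h2]

theorem goA_eq (A : List Int) (key : Int) (i : Nat) :
    goA A key i = altOf A key i :=
  goA_eq_aux A key (A.length - i) i (le_refl _)

-- ===== VERDICT (by name: the statement is the Claim_ definition above) =====
theorem getChildrenKeysViaArray_spec : Claim_equal_getChildrenKeysViaArray := by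
  intro A key i _ hpre
  unfold Spec_getChildrenKeysViaArray getChildrenKeysViaArray getChildrenKeysViaArray_alt
  have h0 : ¬ i < 0 := not_lt.mpr hpre
  simp only [h0, if_false, goA_eq, altOf]
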